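-- pv_equiv track=rewrite | github.com/DenBugNBA/YandexAlgorithmsTrainings | 6. Binary search (1.0)/I_Cleaning_day.py | check_possible_difference
-- ===== SOURCE A (Python) =====
-- def check_possible_difference(difference, params):
--     r, c, heights = params
--
--     teams_count = 0
--
--     left = 0
--     for right in range(len(heights)):
--         if right - left + 1 == c:
--             if heights[right] - heights[left] <= difference:
--                 teams_count += 1
--                 left = right + 1
--             else:
--                 left += 1
--
--     return teams_count >= r
-- ===== SOURCE B (Python) =====
-- def check_possible_difference(difference, params):
--     r, c, heights = params
--     n = len(heights)
--     if c <= 0: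
--         return 0 >= r
--     good = [b - a <= difference for a, b in zip(heights, heights[c - 1:])]
--     fs = []  # DP table stored back to front: fs[-1] = value for the lowest start filled so far
--     for i in reversed(range(n - c + 1)):
--         if good[i]:
--             v = 1 + (fs[len(fs) - c] if c <= len(fs) else 0)
--         else:
--             v = fs[-1] if fs else 0
--         fs.append(v)
--     return (fs[-1] if fs else 0) >= r
-- ===== Notes on version B (the rewrite author's own statement) =====
-- stated objective: alternative
-- what changed: Replaces A's left-to-right two-pointer greedy scan by two staged passes: first precompute a boolean feasibility list for every window of size c via zip with a shifted slice, then fill a dynamic-programming table right-to-left (fs[i] = 1 + fs[i+c] if the window at i is feasible else fs[i+1]) and compare fs[0] with r.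
import Mathlib
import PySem

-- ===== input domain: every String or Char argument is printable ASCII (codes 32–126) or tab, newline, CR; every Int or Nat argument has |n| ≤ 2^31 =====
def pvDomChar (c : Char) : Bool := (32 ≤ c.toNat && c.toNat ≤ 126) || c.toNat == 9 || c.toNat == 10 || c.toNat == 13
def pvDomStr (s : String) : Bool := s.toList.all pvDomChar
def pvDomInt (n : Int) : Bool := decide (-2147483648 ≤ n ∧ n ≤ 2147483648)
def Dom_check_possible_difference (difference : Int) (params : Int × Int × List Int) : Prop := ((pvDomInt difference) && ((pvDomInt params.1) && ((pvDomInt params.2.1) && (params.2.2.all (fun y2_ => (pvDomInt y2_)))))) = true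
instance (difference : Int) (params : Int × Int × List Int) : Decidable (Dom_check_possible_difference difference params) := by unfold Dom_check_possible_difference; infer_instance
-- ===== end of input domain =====

-- B replaces A's left-to-right two-pointer greedy scan by two staged passes: a precomputed
-- window-feasibility list (zip with a shifted slice) and a right-to-left DP table; same value, total.

-- ===== PORT A =====
-- loop body of A's for-loop; state = (teams_count, left).
-- indexing uses pyGetD: both indices are always in range here (0 ≤ left ≤ right < len), so it is exact.
def stepA (difference c : Int) (heights : List Int) (s : Int × Int) (right : Int) : Int × Int :=
  if right - s.2 + 1 = c then
    if PySem.List.pyGetD heights right 0 - PySem.List.pyGetD heights s.2 0 ≤ difference then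
      (s.1 + 1, right + 1)
    else (s.1, s.2 + 1)
  else s

def check_possible_difference (difference : Int) (params : Int × Int × List Int) : Bool :=
  let r := params.1
  let c := params.2.1
  let heights := params.2.2
  let st := (PySem.List.pyRange 0 (heights.length : Int) 1).foldl (stepA difference c heights) (0, 0)
  decide (st.1 ≥ r)

-- ===== PORT B =====
-- loop body of B's DP loop: append the value for start position i to the back-to-front table fs;
-- the indices used (len-c when c ≤ len, and -1 on a nonempty list) are in range, so pyGetD is exact.
def dpStepB (c : Int) (good : List Bool) (fs : List Int) (i : Int) : List Int :=
  let v :=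
    if PySem.List.pyGetD good i false then
      1 + (if c ≤ (fs.length : Int) then PySem.List.pyGetD fs ((fs.length : Int) - c) 0 else 0)
    else (if fs = [] then 0 else PySem.List.pyGetD fs (-1) 0)
  fs ++ [v]

def check_possible_difference_alt (difference : Int) (params : Int × Int × List Int) : Bool :=
  let r := params.1
  let c := params.2.1
  let heights := params.2.2
  if c ≤ 0 then decide ((0 : Int) ≥ r)
  else
    let good := (heights.zip (PySem.List.slice heights (some (c - 1)) none)).map
      (fun p => decide (p.2 - p.1 ≤ difference))
    let fs := ((PySem.List.pyRange 0 ((heights.length : Int) - c + 1) 1).reverse).foldl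
      (dpStepB c good) []
    decide ((if fs = [] then 0 else PySem.List.pyGetD fs (-1) 0) ≥ r)

-- ===== PRECONDITION & SPEC =====
def Spec_check_possible_difference (difference : Int) (params : Int × Int × List Int) (out : Bool) : Prop := out = check_possible_difference_alt difference params
instance (difference : Int) (params : Int × Int × List Int) (out : Bool) : Decidable (Spec_check_possible_difference difference params out) := by unfold Spec_check_possible_difference; infer_instance

-- ===== CLAIM (what is proved, stated in full; the proofs are below) =====
def Claim_equal_check_possible_difference : Prop := ∀ (difference : Int) (params : Int × Int × List Int), Dom_check_possible_difference difference params → Spec_check_possible_difference difference params (check_possible_difference difference params)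

-- ===== LEMMAS AND PROOFS =====

-- Proof-only greedy recursion: number of teams A's scan forms from start position i (fuel-bounded).
def gcount (difference c : Int) (heights : List Int) : Nat → Int → Int
  | 0, _ => 0
  | fuel + 1, i =>
    if i + c - 1 < (heights.length : Int) then
      if PySem.List.pyGetD heights (i + c - 1) 0 - PySem.List.pyGetD heights i 0 ≤ difference then
        1 + gcount difference c heights fuel (i + c)
      else gcount difference c heights fuel (i + 1)
    else 0

theorem gcount_zero_of_out (difference c : Int) (heights : List Int) (fuel : Nat) (i : Int)
    (h : ¬ i + c - 1 < (heights.length : Int)) :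
    gcount difference c heights fuel i = 0 := by
  cases fuel <;> simp [gcount, h]

theorem gcount_stable (difference c : Int) (heights : List Int) (hc : 1 ≤ c) (F : Nat) :
    ∀ (F' : Nat) (i : Int), 0 ≤ i →
    ((heights.length : Int) - i).toNat ≤ F → ((heights.length : Int) - i).toNat ≤ F' →
    gcount difference c heights F i = gcount difference c heights F' i := by
  induction F with
  | zero =>
    intro F' i hi hF hF'
    have h : ¬ i + c - 1 < (heights.length : Int) := by omega
    rw [gcount_zero_of_out _ _ _ _ _ h, gcount_zero_of_out _ _ _ _ _ h]
  | succ F ih =>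
    intro F' i hi hF hF'
    by_cases h : i + c - 1 < (heights.length : Int)
    · match F' with
      | 0 => omega
      | F' + 1 =>
        simp only [gcount, if_pos h]
        by_cases hok : PySem.List.pyGetD heights (i + c - 1) 0 - PySem.List.pyGetD heights i 0 ≤ difference
        · rw [if_pos hok, if_pos hok, ih F' (i + c) (by omega) (by omega) (by omega)]
        · rw [if_neg hok, if_neg hok, ih F' (i + 1) (by omega) (by omega) (by omega)]
    · rw [gcount_zero_of_out _ _ _ _ _ h, gcount_zero_of_out _ _ _ _ _ h]

-- With c ≤ 0 the window-size test `right - left + 1 == c` never fires, so A's fold is a no-op.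
theorem foldA_noop (difference c : Int) (heights : List Int) (rs : List Int) (l t : Int)
    (hc : c ≤ 0) (hmem : ∀ x ∈ rs, l ≤ x) :
    List.foldl (stepA difference c heights) (t, l) rs = (t, l) := by
  induction rs with
  | nil => rfl
  | cons r rs ih =>
    have hr : l ≤ r := hmem r (by simp)
    have : stepA difference c heights (t, l) r = (t, l) := by
      simp only [stepA]
      rw [if_neg (by omega)]
    rw [List.foldl_cons, this]
    exact ih (fun x hx => hmem x (by simp [hx]))

-- Core correspondence on the A side: the fold from right = r₀ with left = l adds exactly
-- gcount … l teams, under the loop invariant l ≤ r₀ ≤ l + c - 1.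
theorem foldA_eq_gcount (difference c : Int) (heights : List Int) (k : Nat) :
    ∀ (r₀ l t : Int) (fuel : Nat), 1 ≤ c → l ≤ r₀ → r₀ ≤ l + c - 1 →
    ((heights.length : Int) - r₀).toNat ≤ k → (heights.length : Int) - l ≤ (fuel : Int) →
    (((PySem.List.pyRange r₀ (heights.length : Int) 1).foldl (stepA difference c heights) (t, l)).1 : Int)
      = t + gcount difference c heights fuel l := by
  induction k with
  | zero =>
    intro r₀ l t fuel hc hlr hrc hk hfuel
    have hn : (heights.length : Int) ≤ r₀ := by omega
    rw [PySem.List.pyRange_one_eq_nil hn,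
        gcount_zero_of_out _ _ _ _ _ (by omega)]
    simp
  | succ k ih =>
    intro r₀ l t fuel hc hlr hrc hk hfuel
    by_cases hn : (heights.length : Int) ≤ r₀
    · rw [PySem.List.pyRange_one_eq_nil hn,
          gcount_zero_of_out _ _ _ _ _ (by omega)]
      simp
    · have hr : r₀ < (heights.length : Int) := by omega
      rw [PySem.List.pyRange_one_cons hr, List.foldl_cons]
      by_cases hwin : r₀ - l + 1 = c
      · have hre : l + c - 1 = r₀ := by omega
        match fuel with
        | 0 => omega
        | fuel + 1 =>
          simp only [stepA, gcount, if_pos hwin, hre, if_pos hr]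
          by_cases hok : PySem.List.pyGetD heights r₀ 0 - PySem.List.pyGetD heights l 0 ≤ difference
          · rw [if_pos hok, if_pos hok]
            have hlc : l + c = r₀ + 1 := by omega
            rw [hlc]
            rw [ih (r₀ + 1) (r₀ + 1) (t + 1) fuel hc (by omega) (by omega) (by omega) (by omega)]
            omega
          · rw [if_neg hok, if_neg hok]
            exact ih (r₀ + 1) (l + 1) t fuel hc (by omega) (by omega) (by omega) (by omega)
      · have : stepA difference c heights (t, l) r₀ = (t, l) := by
          simp only [stepA]
          rw [if_neg hwin]
        rw [this]
        exact ih (r₀ + 1) l t fuel hc (by omega) (by omega) (by omega) hfuel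

-- gv i: the greedy team count from start position i, with canonical fuel.
def gv (difference c : Int) (heights : List Int) (i : Int) : Int :=
  gcount difference c heights heights.length i

theorem gv_unfold (difference c : Int) (heights : List Int) (hc : 1 ≤ c) (i : Int) (hi : 0 ≤ i) :
    gv difference c heights i =
      if i + c - 1 < (heights.length : Int) then
        if PySem.List.pyGetD heights (i + c - 1) 0 - PySem.List.pyGetD heights i 0 ≤ difference then
          1 + gv difference c heights (i + c)
        else gv difference c heights (i + 1)
      else 0 := by
  by_cases h : i + c - 1 < (heights.length : Int)
  · rw [if_pos h]
    obtain ⟨F, hF⟩ : ∃ F, heights.length = F + 1 := ⟨heights.length - 1, by omega⟩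
    have key : gv difference c heights i = gcount difference c heights (F + 1) i := by
      unfold gv; rw [hF]
    rw [key]
    simp only [gcount, if_pos h]
    by_cases hok : PySem.List.pyGetD heights (i + c - 1) 0 - PySem.List.pyGetD heights i 0 ≤ difference
    · rw [if_pos hok, if_pos hok]
      have : gcount difference c heights F (i + c) = gv difference c heights (i + c) := by
        unfold gv
        exact gcount_stable difference c heights hc F heights.length (i + c) (by omega) (by omega) (by omega)
      rw [this]
    · rw [if_neg hok, if_neg hok]
      have : gcount difference c heights F (i + 1) = gv difference c heights (i + 1) := by
        unfold gv
        exact gcount_stable difference c heights hc F heights.length (i + 1) (by omega) (by omega) (by omega)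
      rw [this]
  · rw [if_neg h]
    exact gcount_zero_of_out _ _ _ _ _ h

theorem gv_zero_of_out (difference c : Int) (heights : List Int) (i : Int)
    (h : ¬ i + c - 1 < (heights.length : Int)) :
    gv difference c heights i = 0 :=
  gcount_zero_of_out _ _ _ _ _ h

-- The precomputed feasibility list answers exactly A's window test.
theorem good_lookup (difference c : Int) (heights : List Int) (hc : 1 ≤ c) (i : Int)
    (hi : 0 ≤ i) (hin : i + c - 1 < (heights.length : Int)) :
    PySem.List.pyGetD
      ((heights.zip (PySem.List.slice heights (some (c - 1)) none)).map
        (fun p => decide (p.2 - p.1 ≤ difference))) i false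
      = decide (PySem.List.pyGetD heights (i + c - 1) 0 - PySem.List.pyGetD heights i 0 ≤ difference) := by
  rw [PySem.List.slice_from heights (show (0:Int) ≤ c - 1 by omega)]
  have hlen : i.toNat < ((heights.zip (heights.drop (c - 1).toNat)).map
      (fun p : Int × Int => decide (p.2 - p.1 ≤ difference))).length := by
    simp [List.length_zip, List.length_drop]
    omega
  rw [PySem.List.pyGetD_eq_getElem _ _ hi (by omega)]
  rw [PySem.List.pyGetD_eq_getElem _ _ (by omega : (0:Int) ≤ i + c - 1) (by omega),
      PySem.List.pyGetD_eq_getElem _ _ hi (by omega)]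
  simp only [List.getElem_map, List.getElem_zip, List.getElem_drop]
  have hidx : (c - 1).toNat + i.toNat = (i + c - 1).toNat := by omega
  simp only [hidx]

-- One DP step: appending position j's value to the back-to-front table for positions j+1 …
theorem dpStep_cons (difference c : Int) (heights : List Int) (hc : 1 ≤ c) (j : Int)
    (hj : 0 ≤ j) (hjm : j < (heights.length : Int) - c + 1) :
    dpStepB c
        ((heights.zip (PySem.List.slice heights (some (c - 1)) none)).map
          (fun p => decide (p.2 - p.1 ≤ difference)))
        (((PySem.List.pyRange (j + 1) ((heights.length : Int) - c + 1) 1).map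
            (gv difference c heights)).reverse) j
      = (((PySem.List.pyRange (j + 1) ((heights.length : Int) - c + 1) 1).map
            (gv difference c heights)).reverse) ++ [gv difference c heights j] := by
  have hin : j + c - 1 < (heights.length : Int) := by omega
  have hlen : (((PySem.List.pyRange (j + 1) ((heights.length : Int) - c + 1) 1).map
      (gv difference c heights)).reverse).length = ((heights.length : Int) - c + 1 - (j + 1)).toNat := by
    simp [PySem.List.length_pyRange_one]
  simp only [dpStepB]
  rw [good_lookup difference c heights hc j hj hin]
  rw [gv_unfold difference c heights hc j hj, if_pos hin]
  by_cases hok : PySem.List.pyGetD heights (j + c - 1) 0 - PySem.List.pyGetD heights j 0 ≤ difference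
  · rw [if_pos (by simp [hok]), if_pos hok]
    congr 3
    by_cases hcl : c ≤ ((((PySem.List.pyRange (j + 1) ((heights.length : Int) - c + 1) 1).map
        (gv difference c heights)).reverse).length : Int)
    · rw [if_pos hcl]
      rw [PySem.List.pyGetD_eq_getElem _ _ (by omega) (by omega)]
      rw [List.getElem_reverse, List.getElem_map, PySem.List.getElem_pyRange_one]
      congr 1
      simp only [List.length_map, PySem.List.length_pyRange_one] at hlen hcl ⊢
      omega
    · rw [if_neg hcl]
      exact (gv_zero_of_out difference c heights (j + c) (by omega)).symm
  · rw [if_neg (by simp [hok]), if_neg hok]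
    congr 2
    by_cases hje : (heights.length : Int) - c + 1 ≤ j + 1
    · rw [PySem.List.pyRange_one_eq_nil hje]
      rw [if_pos (by simp)]
      exact (gv_zero_of_out difference c heights (j + 1) (by omega)).symm
    · rw [PySem.List.pyRange_one_cons (by omega), List.map_cons, List.reverse_cons]
      rw [if_neg (by simp), PySem.List.pyGetD_neg_one_append_singleton]

-- The DP fold builds exactly the (back-to-front) table of greedy counts for every start position.
theorem dp_fold_eq_map (difference c : Int) (heights : List Int) (hc : 1 ≤ c) (k : Nat) :
    ∀ (j : Int), 0 ≤ j → ((heights.length : Int) - c + 1 - j).toNat ≤ k →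
    ((PySem.List.pyRange j ((heights.length : Int) - c + 1) 1).reverse).foldl
        (dpStepB c
          ((heights.zip (PySem.List.slice heights (some (c - 1)) none)).map
            (fun p => decide (p.2 - p.1 ≤ difference)))) []
      = ((PySem.List.pyRange j ((heights.length : Int) - c + 1) 1).map (gv difference c heights)).reverse := by
  induction k with
  | zero =>
    intro j hj hk
    rw [PySem.List.pyRange_one_eq_nil (by omega)]
    rfl
  | succ k ih =>
    intro j hj hk
    by_cases hjm : (heights.length : Int) - c + 1 ≤ j
    · rw [PySem.List.pyRange_one_eq_nil hjm]
      rfl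
    · rw [PySem.List.pyRange_one_cons (by omega), List.reverse_cons, List.foldl_append]
      rw [ih (j + 1) (by omega) (by omega)]
      simp only [List.foldl_cons, List.foldl_nil, List.map_cons]
      rw [List.reverse_cons]
      exact dpStep_cons difference c heights hc j hj (by omega)

-- ===== VERDICT (by name: the statement is the Claim_ definition above) =====
theorem check_possible_difference_spec : Claim_equal_check_possible_difference := by
  intro difference params _
  obtain ⟨r, c, heights⟩ := params
  unfold Spec_check_possible_difference
  simp only [check_possible_difference, check_possible_difference_alt]
  by_cases hc : c ≤ 0
  · rw [if_pos hc]
    rw [foldA_noop difference c heights _ 0 0 hc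
      (fun x hx => ((PySem.List.mem_pyRange_one).mp hx).1)]
  · rw [if_neg hc]
    have hc1 : 1 ≤ c := by omega
    rw [dp_fold_eq_map difference c heights hc1 ((heights.length : Int) - c + 1).toNat 0
      (by omega) (by omega)]
    rw [foldA_eq_gcount difference c heights heights.length 0 0 0 heights.length
      hc1 (by omega) (by omega) (by omega) (by omega)]
    by_cases hm : (heights.length : Int) - c + 1 ≤ 0
    · rw [PySem.List.pyRange_one_eq_nil hm]
      show (decide (0 + gcount difference c heights heights.length 0 ≥ r)) = _
      rw [gcount_zero_of_out _ _ _ _ _ (by omega)]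
      simp
    · rw [PySem.List.pyRange_one_cons (by omega), List.map_cons, List.reverse_cons]
      rw [if_neg (by simp), PySem.List.pyGetD_neg_one_append_singleton]
      show decide (0 + gcount difference c heights heights.length 0 ≥ r) = _
      norm_num
      rfl
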